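-- pv_equiv track=rewrite | github.com/dineshk47/push-it | app/problems/service.py | in_str
-- ===== SOURCE A (Python) =====
-- def in_str(string):
--     parts = string.split(".")
--     parts.reverse()
--     result = ""
--     for p in parts:
--         result += "{" + p
--     result += "}" * len(parts)
--     return result
-- ===== SOURCE B (Python) =====
-- def in_str(string):
--     def nest(parts, acc):
--         if not parts:
--             return acc
--         return nest(parts[1:], "{" + parts[0] + acc + "}")
--     return nest(string.split("."), "")
-- ===== Notes on version B (the rewrite author's own statement) =====
-- stated objective: simpler
-- what changed: B drops the reverse() call and the deferred closing-brace tail: a recursive helper consumes the parts in original order and wraps an always fully balanced accumulator (open brace, part, accumulator, close brace) at each step, so the first part ends up innermost.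
import Mathlib
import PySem

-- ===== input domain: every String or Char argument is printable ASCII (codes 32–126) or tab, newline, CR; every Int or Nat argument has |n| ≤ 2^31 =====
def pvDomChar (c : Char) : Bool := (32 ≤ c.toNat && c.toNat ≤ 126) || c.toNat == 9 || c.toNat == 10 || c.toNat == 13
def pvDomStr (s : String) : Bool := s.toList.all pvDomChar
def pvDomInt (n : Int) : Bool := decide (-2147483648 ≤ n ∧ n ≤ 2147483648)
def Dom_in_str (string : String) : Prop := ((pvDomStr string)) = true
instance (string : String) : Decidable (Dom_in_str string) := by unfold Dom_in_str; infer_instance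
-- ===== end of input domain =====

-- B replaces A's reverse-and-append-closing-braces loop by a recursive helper consuming the
-- parts in original order while wrapping a fully balanced accumulator; objective: simpler.

-- ===== PORT A =====
def in_str (string : String) : String :=
  let parts := ((PySem.Str.split? string ".").getD []).reverse
  let result := parts.foldl (fun r p => r ++ "{" ++ p) ""
  -- '"}" * len(parts)': exact port of Python string repetition of a 1-char string
  result ++ String.ofList (List.replicate parts.length '}')

-- ===== PORT B =====
-- recursive helper 'nest(parts, acc)' from Source B
def in_str_nest : List String → String → String
  | [], acc => acc
  | p :: rest, acc => in_str_nest rest ("{" ++ p ++ acc ++ "}")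

def in_str_alt (string : String) : String :=
  in_str_nest ((PySem.Str.split? string ".").getD []) ""

-- ===== PRECONDITION & SPEC =====
def Spec_in_str (string : String) (out : String) : Prop := out = in_str_alt string
instance (string : String) (out : String) : Decidable (Spec_in_str string out) := by unfold Spec_in_str; infer_instance

-- ===== CLAIM (what is proved, stated in full; the proofs are below) =====
def Claim_equal_in_str : Prop := ∀ (string : String), Dom_in_str string → Spec_in_str string (in_str string)

-- ===== LEMMAS AND PROOFS =====

theorem nest_eq (ps : List String) : ∀ (acc : String),
    in_str_nest ps acc
      = (ps.reverse.foldl (fun r p => r ++ "{" ++ p) "") ++ acc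
          ++ String.ofList (List.replicate ps.length '}') := by
  induction ps with
  | nil => intro acc; simp [in_str_nest]
  | cons p ps ih =>
    intro acc
    have hrep : String.ofList (List.replicate (p :: ps).length '}')
        = "}" ++ String.ofList (List.replicate ps.length '}') := by
      apply String.ext
      simp [List.replicate_succ]
    simp only [in_str_nest, ih, List.reverse_cons, List.foldl_append, List.foldl_cons,
      List.foldl_nil, hrep]
    simp [String.append_assoc]

-- ===== VERDICT (by name: the statement is the Claim_ definition above) =====
theorem in_str_spec : Claim_equal_in_str := by
  intro string _
  show in_str string = in_str_alt string
  simpa [in_str, in_str_alt] using (nest_eq ((PySem.Str.split? string ".").getD []) "").symm
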